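-- pv_equiv track=rewrite | github.com/dkostmii/best-hackathon-test | app/dependencies.py | get_sort_by
-- ===== SOURCE A (Python) =====
-- from enum import Enum
--
-- class SortByENUM(Enum):
--     NEWEST = "newest"
--     OLDEST = "oldest"
--     ENDING = "ending"
--
-- def get_sort_by(sort_by: str) -> str | None:
--     if sort_by is not None:
--         values = [e.value for e in SortByENUM]
--         if sort_by.lower() not in values:
--             return None
--     else:
--         return None
--
--     return sort_by.lower()
-- ===== SOURCE B (Python) =====
-- from enum import Enum
--
-- class SortByENUM(Enum):
--     NEWEST = "newest"
--     OLDEST = "oldest"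
--     ENDING = "ending"
--
-- # First-character dispatch: the three valid values start with distinct letters,
-- # so look up the lowercased first character in a table and do ONE full equality
-- # check against the unique candidate, instead of scanning the list of values.
-- _BY_INITIAL = {"n": "newest", "o": "oldest", "e": "ending"}
--
-- def get_sort_by(sort_by: str) -> str | None:
--     if sort_by is None:
--         return None
--     l = sort_by.lower()
--     candidate = _BY_INITIAL.get(l[:1])
--     return l if candidate == l else None
-- ===== Notes on version B (the rewrite author's own statement) =====
-- stated objective: alternative
-- what changed: Replaces building the enum-value list and scanning it with first-character dispatch: a table keyed by the initial letter (the three values start with distinct letters) yields a unique candidate which is checked with one equality, so no scan over the values happens.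
import Mathlib
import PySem

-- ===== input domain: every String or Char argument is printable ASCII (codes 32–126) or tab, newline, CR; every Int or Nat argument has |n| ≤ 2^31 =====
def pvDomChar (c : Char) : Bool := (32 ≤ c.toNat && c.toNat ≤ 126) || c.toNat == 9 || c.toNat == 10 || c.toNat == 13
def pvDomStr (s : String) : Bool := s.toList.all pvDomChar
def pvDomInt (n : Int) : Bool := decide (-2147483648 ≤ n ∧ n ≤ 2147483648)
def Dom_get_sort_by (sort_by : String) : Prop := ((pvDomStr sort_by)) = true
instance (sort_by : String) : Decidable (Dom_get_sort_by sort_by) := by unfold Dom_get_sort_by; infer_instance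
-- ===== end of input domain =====

-- B validates by first-character dispatch (a table keyed by the initial letter gives the unique candidate, checked with one equality) instead of scanning the list of enum values; alternative decomposition, same result.


-- ===== PORT A =====
-- Port of A: build the list of enum values and test membership of the lowercased string.
def sortByValues : List String := ["newest", "oldest", "ending"]
def get_sort_by (sort_by : String) : Option String :=
  let values := sortByValues
  if PySem.Str.lower sort_by ∈ values then some (PySem.Str.lower sort_by) else none

-- ===== PORT B =====
-- Port of B: table keyed by the initial letter; look up l[:1], compare l to the unique candidate.
def byInitial : PySem.Dict String String := PySem.Dict.ofList [("n", "newest"), ("o", "oldest"), ("e", "ending")]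
def get_sort_by_alt (sort_by : String) : Option String :=
  let l := PySem.Str.lower sort_by
  let candidate := byInitial.get? (PySem.Str.slice l none (some 1))
  if candidate = some l then some l else none

-- ===== PRECONDITION & SPEC =====
def Spec_get_sort_by (sort_by : String) (out : Option String) : Prop := out = get_sort_by_alt sort_by
instance (sort_by : String) (out : Option String) : Decidable (Spec_get_sort_by sort_by out) := by unfold Spec_get_sort_by; infer_instance

-- ===== CLAIM =====
def Claim_equal_get_sort_by : Prop := ∀ (sort_by : String), Dom_get_sort_by sort_by → Spec_get_sort_by sort_by (get_sort_by sort_by)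

-- ===== LEMMAS AND PROOFS =====
-- The two bodies agree for every lowercased string l: B's candidate can only be one of
-- the three values, and "candidate = some l" holds exactly when l is one of them.
theorem bodies_agree (l : String) :
    (if l ∈ (["newest", "oldest", "ending"] : List String) then some l else none) =
      (if byInitial.get? (PySem.Str.slice l none (some 1)) = some l then some l else none) := by
  by_cases h1 : l = "newest"
  · subst h1; decide
  by_cases h2 : l = "oldest"
  · subst h2; decide
  by_cases h3 : l = "ending"
  · subst h3; decide
  have hmem : l ∉ (["newest", "oldest", "ending"] : List String) := by
    simp [h1, h2, h3]
  rw [if_neg hmem]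
  have hc : byInitial.get? (PySem.Str.slice l none (some 1)) ≠ some l := by
    have hb : byInitial = PySem.Dict.mk [("n", "newest"), ("o", "oldest"), ("e", "ending")] := by rfl
    set k := PySem.Str.slice l none (some 1)
    simp only [hb, PySem.Dict.get?_mk_cons]
    split_ifs <;> simp_all [PySem.Dict.get?]
    · exact fun h => h1 h.symm
    · exact fun h => h2 h.symm
    · exact fun h => h3 h.symm
  rw [if_neg hc]

-- ===== VERDICT =====
theorem get_sort_by_spec : Claim_equal_get_sort_by := by
  intro s _
  unfold Spec_get_sort_by get_sort_by get_sort_by_alt sortByValues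
  exact bodies_agree (PySem.Str.lower s)
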